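-- pv_equiv track=rewrite | github.com/zakharbalandin/programming_technologies | Tagging_Parts_of_Speech and counting_punctuation_marks.py | counting_punctuation_marks
-- ===== SOURCE A (Python) =====
-- def counting_punctuation_marks(sentence):
--     words = sentence.split()
--     question_marks_count, exclamation_marks_count = 0, 0
--
--     for word in words:
--         for symb in word:
--             if symb == '!':
--                 question_marks_count += 1
--             if symb == '?':
--                 exclamation_marks_count += 1
--
--     return {'question_marks_count': question_marks_count, 'exclamation_marks_count': exclamation_marks_count}
-- ===== SOURCE B (Python) =====
-- def counting_punctuation_marks(sentence):
--     # No explicit loop at all: two staged substring counts over the whole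
--     # string.  Whitespace is never '!' or '?', so skipping A's split changes
--     # nothing; A's swapped label mapping is kept as-is.
--     return {'question_marks_count': sentence.count('!'),
--             'exclamation_marks_count': sentence.count('?')}
-- ===== Notes on version B (the rewrite author's own statement) =====
-- stated objective: faster
-- what changed: B removes A's split-into-words and nested per-character counting loops entirely and instead makes two str.count substring scans over the whole sentence (A's swapped label mapping is preserved).
import Mathlib
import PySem

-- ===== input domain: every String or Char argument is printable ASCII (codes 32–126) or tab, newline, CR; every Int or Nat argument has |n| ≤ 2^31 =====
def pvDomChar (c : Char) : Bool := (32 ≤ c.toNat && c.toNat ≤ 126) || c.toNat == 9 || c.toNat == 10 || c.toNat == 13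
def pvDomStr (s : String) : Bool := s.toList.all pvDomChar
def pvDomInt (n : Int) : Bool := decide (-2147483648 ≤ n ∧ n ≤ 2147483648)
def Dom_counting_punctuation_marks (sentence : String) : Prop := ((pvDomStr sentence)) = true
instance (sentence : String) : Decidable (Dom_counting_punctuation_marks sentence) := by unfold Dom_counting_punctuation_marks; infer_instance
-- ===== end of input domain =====

-- B replaces A's split-into-words + nested character loops by two str.count substring scans; same O(n) cost, no explicit loop.

-- ===== PORT A =====
-- the body of A's nested loop: two independent ifs, in A's order
def pvStepA (acc : Int × Int) (symb : Char) : Int × Int :=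
  let acc1 := if symb = '!' then (acc.1 + 1, acc.2) else acc
  if symb = '?' then (acc1.1, acc1.2 + 1) else acc1

def counting_punctuation_marks (sentence : String) : List (String × Int) :=
  let words := PySem.Str.split₀ sentence
  let p := words.foldl (fun acc word => word.toList.foldl pvStepA acc) ((0 : Int), (0 : Int))
  [("question_marks_count", p.1), ("exclamation_marks_count", p.2)]

-- ===== PORT B =====
def counting_punctuation_marks_alt (sentence : String) : List (String × Int) :=
  [("question_marks_count", (PySem.Str.count sentence "!" : Int)),
   ("exclamation_marks_count", (PySem.Str.count sentence "?" : Int))]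

-- ===== PRECONDITION & SPEC =====
def Spec_counting_punctuation_marks (sentence : String) (out : List (String × Int)) : Prop := out = counting_punctuation_marks_alt sentence
instance (sentence : String) (out : List (String × Int)) : Decidable (Spec_counting_punctuation_marks sentence out) := by unfold Spec_counting_punctuation_marks; infer_instance

-- ===== CLAIM (what is proved, stated in full; the proofs are below) =====
def Claim_equal_counting_punctuation_marks : Prop := ∀ (sentence : String), Dom_counting_punctuation_marks sentence → Spec_counting_punctuation_marks sentence (counting_punctuation_marks sentence)

-- ===== LEMMAS AND PROOFS =====

-- the inner character loop adds the counts of '!' and '?' of the word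
lemma foldl_stepA (cs : List Char) (q e : Int) :
    cs.foldl pvStepA (q, e) = (q + cs.count '!', e + cs.count '?') := by
  induction cs generalizing q e with
  | nil => simp
  | cons c cs ih =>
    simp only [List.foldl_cons, List.count_cons, ih, pvStepA]
    by_cases h1 : c = '!' <;> by_cases h2 : c = '?' <;>
      simp_all <;> omega

-- the outer word loop sums the per-word counts
lemma foldl_words (ws : List String) (q e : Int) :
    ws.foldl (fun acc word => word.toList.foldl pvStepA acc) (q, e) =
      (q + ((ws.map (fun w => (w.toList.count '!' : Int))).sum),
       e + ((ws.map (fun w => (w.toList.count '?' : Int))).sum)) := by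
  induction ws generalizing q e with
  | nil => simp
  | cons w ws ih => simp [ih, foldl_stepA]; constructor <;> ring

-- per-word counts of a non-whitespace character across split₀.go sum to the whole count
lemma split_go_count (c : Char) (hc : PySem.Chars.isspace c = false) :
    ∀ (s cur : List Char) (acc : List (List Char)),
    ((PySem.Chars.split₀.go s cur acc).map (fun w => w.count c)).sum =
      s.count c + cur.count c + ((acc.map (fun w => w.count c)).sum) := by
  intro s
  induction s with
  | nil =>
    intro cur acc
    unfold PySem.Chars.split₀.go
    by_cases h : cur.isEmpty <;> simp_all [List.map_reverse, List.isEmpty_iff] <;> omega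
  | cons ch rest ih =>
    intro cur acc
    unfold PySem.Chars.split₀.go
    by_cases hs : PySem.Chars.isspace ch
    · have hne : ch ≠ c := by intro h; rw [h] at hs; simp [hs] at hc
      by_cases h2 : cur.isEmpty <;> simp_all [ih] <;> omega
    · simp only [hs, Bool.false_eq_true, if_false, ih]
      simp [List.count_cons]
      by_cases h : ch = c <;> simp [h] <;> ring

lemma split₀_count (c : Char) (hc : PySem.Chars.isspace c = false) (s : List Char) :
    ((PySem.Chars.split₀ s).map (fun w => w.count c)).sum = s.count c := by
  simpa using split_go_count c hc s [] []

lemma sum_map_count_int (c : Char) (ws : List String) :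
    ((ws.map (fun w => (w.toList.count c : Int))).sum) =
      (((ws.map String.toList).map (fun w => w.count c)).sum : Nat) := by
  induction ws with
  | nil => simp
  | cons w ws ih => simp [ih]

-- a single-character substring count is the character count (fuel form of Chars.count.go)
lemma count_go_single (c : Char) :
    ∀ (fuel : Nat) (l : List Char) (acc : Nat), l.length ≤ fuel →
      PySem.Chars.count.go [c] fuel l acc = acc + l.count c := by
  intro fuel
  induction fuel with
  | zero => intro l acc h; interval_cases hl : l.length <;> simp_all [PySem.Chars.count.go, List.length_eq_zero_iff.mp hl]
  | succ n ih =>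
    intro l acc h
    cases l with
    | nil => simp [PySem.Chars.count.go]
    | cons x t =>
      unfold PySem.Chars.count.go
      by_cases hx : x = c
      · subst hx
        simp only [List.isPrefixOf_cons₂, List.isPrefixOf_nil_left, Bool.and_true, beq_self_eq_true, if_pos]
        simp only [List.length_singleton, List.drop_succ_cons, List.drop_zero]
        rw [ih t (acc + 1) (by simpa using Nat.lt_succ_iff.mp (by simpa using h))]
        simp [List.count_cons]; omega
      · have : ([c].isPrefixOf (x :: t)) = false := by
          simp [List.isPrefixOf_cons₂]; exact fun h' => (hx (by simpa using h'.symm)).elim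
        simp only [this, Bool.false_eq_true, if_false]
        rw [ih t acc (by simpa using Nat.lt_succ_iff.mp (by simpa using h))]
        simp [List.count_cons, hx]
  
lemma chars_count_single (c : Char) (s : List Char) :
    PySem.Chars.count s [c] = s.count c := by
  simp only [PySem.Chars.count, List.isEmpty_cons, if_false, Bool.false_eq_true]
  exact (count_go_single c s.length s 0 le_rfl).trans (by omega)

-- ===== VERDICT (by name: the statement is the Claim_ definition above) =====
theorem counting_punctuation_marks_spec : Claim_equal_counting_punctuation_marks := by
  intro s _
  show _ = _
  unfold counting_punctuation_marks counting_punctuation_marks_alt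
  simp only [foldl_words, PySem.Str.count_eq]
  rw [sum_map_count_int, sum_map_count_int, PySem.Str.split₀_map_toList,
    split₀_count '!' (by decide) s.toList, split₀_count '?' (by decide) s.toList]
  have h1 := chars_count_single '!' s.toList
  have h2 := chars_count_single '?' s.toList
  simp_all
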